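-- pv_equiv track=rewrite | github.com/mustafaansarii/dp | Questions/88. Merge Sorted Array.py | merge_two_arr
-- ===== SOURCE A (Python) =====
-- def merge_two_arr(arr1, arr2):
--     res = []
--     left1, left2 = 0, 0
--     right1, right2 = len(arr1), len(arr2)
--     while left1 < right1 and left2 < right2:
--         while left1 < right1 and arr1[left1] == 0:
--             left1 += 1
--         while left2 < right2 and arr2[left2] == 0:
--             left2 += 1
--         if left1 < right1 and left2 < right2:
--             if arr1[left1] < arr2[left2]:
--                 res.append(arr1[left1])
--                 left1 += 1
--             elif arr1[left1] > arr2[left2]: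
--                 res.append(arr2[left2])
--                 left2 += 1
--             else:
--                 res.append(arr1[left1])
--                 res.append(arr2[left2])
--                 left1 += 1
--                 left2 += 1
--
--     res.extend([num for num in arr1[left1:] if num != 0])
--     res.extend([num for num in arr2[left2:] if num != 0])
--
--     return res
-- ===== SOURCE B (Python) =====
-- def merge_two_arr(arr1, arr2):
--     a = [x for x in arr1 if x != 0]
--     b = [x for x in arr2 if x != 0]
--     res = []
--     i, j = 0, 0
--     while i < len(a) and j < len(b):
--         if a[i] < b[j]:
--             res.append(a[i])
--             i += 1
--         elif a[i] > b[j]: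
--             res.append(b[j])
--             j += 1
--         else:
--             res.append(a[i])
--             res.append(b[j])
--             i += 1
--             j += 1
--     res.extend(a[i:])
--     res.extend(b[j:])
--     return res
-- ===== Notes on version B (the rewrite author's own statement) =====
-- stated objective: simpler
-- what changed: B filters out zeros from both inputs up front and then runs a plain two-pointer merge (equal elements append both), instead of interleaving zero-skipping scans inside the merge loop as A does.
import Mathlib
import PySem

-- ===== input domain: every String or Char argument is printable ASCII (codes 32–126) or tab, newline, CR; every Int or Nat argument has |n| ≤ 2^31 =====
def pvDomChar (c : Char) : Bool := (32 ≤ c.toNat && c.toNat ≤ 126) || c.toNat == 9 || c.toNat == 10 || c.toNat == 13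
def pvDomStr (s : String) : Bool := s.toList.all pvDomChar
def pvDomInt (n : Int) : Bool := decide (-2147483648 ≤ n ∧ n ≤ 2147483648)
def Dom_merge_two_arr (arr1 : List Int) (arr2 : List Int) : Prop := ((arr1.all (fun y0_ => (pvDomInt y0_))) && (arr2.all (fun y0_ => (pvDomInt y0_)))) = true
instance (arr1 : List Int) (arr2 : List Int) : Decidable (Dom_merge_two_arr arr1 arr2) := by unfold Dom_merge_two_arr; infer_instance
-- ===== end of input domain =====

-- B filters zeros up front and runs a plain two-pointer merge instead of A's in-loop zero-skipping; objective: simpler.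

-- ===== PORT A =====
-- the inner 'while leftK < rightK and arrK[leftK] == 0: leftK += 1' loops
def pvSkipZeros (arr : List Int) (i : Nat) : Nat :=
  if h : i < arr.length ∧ arr.getD i 0 = 0 then pvSkipZeros arr (i + 1) else i
termination_by arr.length - i
decreasing_by omega

theorem pvSkipZeros_ge (arr : List Int) (i : Nat) : i ≤ pvSkipZeros arr i := by
  induction i using pvSkipZeros.induct arr with
  | case1 i h ih => rw [pvSkipZeros, dif_pos h]; omega
  | case2 i h => rw [pvSkipZeros, dif_neg h]

-- A's outer while loop; on exit A extends res with the zero-filtered tails arr1[left1:], arr2[left2:]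
def pvLoopA (arr1 arr2 : List Int) (l1 l2 : Nat) : List Int :=
  if l1 < arr1.length ∧ l2 < arr2.length then
    let l1' := pvSkipZeros arr1 l1
    let l2' := pvSkipZeros arr2 l2
    if h2 : l1' < arr1.length ∧ l2' < arr2.length then
      let x := arr1.getD l1' 0
      let y := arr2.getD l2' 0
      if x < y then x :: pvLoopA arr1 arr2 (l1' + 1) l2'
      else if y < x then y :: pvLoopA arr1 arr2 l1' (l2' + 1)
      else x :: y :: pvLoopA arr1 arr2 (l1' + 1) (l2' + 1)
    else ((arr1.drop l1').filter (fun num => num != 0)) ++ ((arr2.drop l2').filter (fun num => num != 0))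
  else ((arr1.drop l1).filter (fun num => num != 0)) ++ ((arr2.drop l2).filter (fun num => num != 0))
termination_by (arr1.length - l1) + (arr2.length - l2)
decreasing_by
  · have h1 := pvSkipZeros_ge arr1 l1; have h2' := pvSkipZeros_ge arr2 l2; omega
  · have h1 := pvSkipZeros_ge arr1 l1; have h2' := pvSkipZeros_ge arr2 l2; omega
  · have h1 := pvSkipZeros_ge arr1 l1; have h2' := pvSkipZeros_ge arr2 l2; omega

def merge_two_arr (arr1 : List Int) (arr2 : List Int) : List Int :=
  pvLoopA arr1 arr2 0 0

-- ===== PORT B =====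
-- Source B's two-pointer merge over the pre-filtered lists; the final res.extend(a[i:]); res.extend(b[j:]) are the one-sided cases
def pvMergeB : List Int → List Int → List Int
  | [], b => b
  | a, [] => a
  | x :: xs, y :: ys =>
    if x < y then x :: pvMergeB xs (y :: ys)
    else if y < x then y :: pvMergeB (x :: xs) ys
    else x :: y :: pvMergeB xs ys

def merge_two_arr_alt (arr1 : List Int) (arr2 : List Int) : List Int :=
  pvMergeB (arr1.filter (fun num => num != 0)) (arr2.filter (fun num => num != 0))

-- ===== PRECONDITION & SPEC =====
def Spec_merge_two_arr (arr1 : List Int) (arr2 : List Int) (out : List Int) : Prop := out = merge_two_arr_alt arr1 arr2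
instance (arr1 : List Int) (arr2 : List Int) (out : List Int) : Decidable (Spec_merge_two_arr arr1 arr2 out) := by unfold Spec_merge_two_arr; infer_instance

-- ===== CLAIM (what is proved, stated in full; the proofs are below) =====
def Claim_equal_merge_two_arr : Prop := ∀ (arr1 : List Int) (arr2 : List Int), Dom_merge_two_arr arr1 arr2 → Spec_merge_two_arr arr1 arr2 (merge_two_arr arr1 arr2)

-- ===== LEMMAS AND PROOFS =====

theorem pvMergeB_nil_right (a : List Int) : pvMergeB a [] = a := by
  cases a <;> simp [pvMergeB]

-- the filtered tail is unchanged by skipping zeros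
theorem filter_drop_skip (arr : List Int) (i : Nat) :
    (arr.drop (pvSkipZeros arr i)).filter (fun num => num != 0)
      = (arr.drop i).filter (fun num => num != 0) := by
  induction i using pvSkipZeros.induct arr with
  | case1 i h ih =>
    rw [pvSkipZeros, dif_pos h, ih]
    rw [List.drop_eq_getElem_cons h.1, List.filter_cons]
    have : arr[i] = (0 : Int) := by
      have := h.2; rwa [List.getD_eq_getElem arr 0 h.1] at this
    simp [this]
  | case2 i h => rw [pvSkipZeros, dif_neg h]

-- after skipping, an in-range element is nonzero
theorem skip_stop (arr : List Int) (i : Nat) :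
    ¬ (pvSkipZeros arr i < arr.length ∧ arr.getD (pvSkipZeros arr i) 0 = 0) := by
  induction i using pvSkipZeros.induct arr with
  | case1 i h ih => rw [pvSkipZeros, dif_pos h]; exact ih
  | case2 i h => rw [pvSkipZeros, dif_neg h]; exact h

theorem filter_drop_cons (arr : List Int) (i : Nat) (h : i < arr.length)
    (hnz : arr.getD i 0 ≠ 0) :
    (arr.drop i).filter (fun num => num != 0)
      = arr.getD i 0 :: (arr.drop (i + 1)).filter (fun num => num != 0) := by
  rw [List.drop_eq_getElem_cons h, List.filter_cons]
  rw [List.getD_eq_getElem arr 0 h] at hnz ⊢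
  simp [hnz]

theorem pvLoopA_eq (arr1 arr2 : List Int) (l1 l2 : Nat) :
    pvLoopA arr1 arr2 l1 l2
      = pvMergeB ((arr1.drop l1).filter (fun num => num != 0))
                 ((arr2.drop l2).filter (fun num => num != 0)) := by
  induction l1, l2 using pvLoopA.induct arr1 arr2 with
  | case1 l1 l2 h l1' l2' h2 x y hlt ih =>
    rw [pvLoopA, if_pos h, dif_pos h2, if_pos hlt, ih]
    rw [← filter_drop_skip arr1 l1, ← filter_drop_skip arr2 l2]
    have hx := skip_stop arr1 l1; have hy := skip_stop arr2 l2
    rw [filter_drop_cons arr1 _ h2.1 (fun hz => hx ⟨h2.1, hz⟩),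
        filter_drop_cons arr2 _ h2.2 (fun hz => hy ⟨h2.2, hz⟩)]
    rw [pvMergeB, if_pos hlt]
  | case2 l1 l2 h l1' l2' h2 x y hlt hgt ih =>
    rw [pvLoopA, if_pos h, dif_pos h2, if_neg hlt, if_pos hgt, ih]
    rw [← filter_drop_skip arr1 l1, ← filter_drop_skip arr2 l2]
    have hx := skip_stop arr1 l1; have hy := skip_stop arr2 l2
    rw [filter_drop_cons arr1 _ h2.1 (fun hz => hx ⟨h2.1, hz⟩),
        filter_drop_cons arr2 _ h2.2 (fun hz => hy ⟨h2.2, hz⟩)]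
    rw [pvMergeB, if_neg hlt, if_pos hgt]
  | case3 l1 l2 h l1' l2' h2 x y hlt hgt ih =>
    rw [pvLoopA, if_pos h, dif_pos h2, if_neg hlt, if_neg hgt, ih]
    rw [← filter_drop_skip arr1 l1, ← filter_drop_skip arr2 l2]
    have hx := skip_stop arr1 l1; have hy := skip_stop arr2 l2
    rw [filter_drop_cons arr1 _ h2.1 (fun hz => hx ⟨h2.1, hz⟩),
        filter_drop_cons arr2 _ h2.2 (fun hz => hy ⟨h2.2, hz⟩)]
    rw [pvMergeB, if_neg hlt, if_neg hgt]
  | case4 l1 l2 h l1' l2' h2 =>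
    rw [pvLoopA, if_pos h, dif_neg h2]
    rw [← filter_drop_skip arr1 l1, ← filter_drop_skip arr2 l2]
    rcases not_and_or.mp h2 with h' | h'
    · have : arr1.drop (pvSkipZeros arr1 l1) = [] := List.drop_eq_nil_of_le (by omega)
      simp [this, pvMergeB]
    · have : arr2.drop (pvSkipZeros arr2 l2) = [] := List.drop_eq_nil_of_le (by omega)
      simp [this, pvMergeB_nil_right]
  | case5 l1 l2 h =>
    rw [pvLoopA, if_neg h]
    rcases not_and_or.mp h with h' | h'
    · have : arr1.drop l1 = [] := List.drop_eq_nil_of_le (by omega)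
      simp [this, pvMergeB]
    · have : arr2.drop l2 = [] := List.drop_eq_nil_of_le (by omega)
      simp [this, pvMergeB_nil_right]

-- ===== VERDICT (by name: the statement is the Claim_ definition above) =====
theorem merge_two_arr_spec : Claim_equal_merge_two_arr := by
  intro arr1 arr2 _
  unfold Spec_merge_two_arr merge_two_arr merge_two_arr_alt
  simpa using pvLoopA_eq arr1 arr2 0 0
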